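-- pv_equiv track=rewrite | github.com/merc-devel/merc | merc/messages/commands.py | _coalesce_flags
-- ===== SOURCE A (Python) =====
-- def _coalesce_flags(applied_flags):
--   flags = ""
--   args = []
--
--   last_state = None
--   for flag, arg in applied_flags:
--     state, c = flag
--     if state != last_state:
--       flags += state
--       last_state = state
--     flags += c
--
--     if arg is not None:
--       args.append(arg)
--
--   return flags, args
-- ===== SOURCE B (Python) =====
-- def _coalesce_flags(applied_flags):
--   if not applied_flags:
--     return "", []
--
--   def solve(lst):
--     # lst nonempty -> (body, args, first_state, last_state);
--     # the full flag string for lst is first_state + body.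
--     if len(lst) == 1:
--       (state, c), arg = lst[0]
--       return c, ([] if arg is None else [arg]), state, state
--     mid = len(lst) // 2
--     bl, al, firstl, lastl = solve(lst[:mid])
--     br, ar, firstr, lastr = solve(lst[mid:])
--     body = bl + (br if lastl == firstr else firstr + br)
--     return body, al + ar, firstl, lastr
--
--   body, args, first, _ = solve(applied_flags)
--   return first + body, args
-- ===== Notes on version B (the rewrite author's own statement) =====
-- stated objective: alternative
-- what changed: Replaced A's sequential last_state state machine with a divide-and-conquer: each half is solved to a (body, args, first_state, last_state) summary and the halves are merged, re-emitting the right half's state marker only when it differs from the left half's last state.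
import Mathlib
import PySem

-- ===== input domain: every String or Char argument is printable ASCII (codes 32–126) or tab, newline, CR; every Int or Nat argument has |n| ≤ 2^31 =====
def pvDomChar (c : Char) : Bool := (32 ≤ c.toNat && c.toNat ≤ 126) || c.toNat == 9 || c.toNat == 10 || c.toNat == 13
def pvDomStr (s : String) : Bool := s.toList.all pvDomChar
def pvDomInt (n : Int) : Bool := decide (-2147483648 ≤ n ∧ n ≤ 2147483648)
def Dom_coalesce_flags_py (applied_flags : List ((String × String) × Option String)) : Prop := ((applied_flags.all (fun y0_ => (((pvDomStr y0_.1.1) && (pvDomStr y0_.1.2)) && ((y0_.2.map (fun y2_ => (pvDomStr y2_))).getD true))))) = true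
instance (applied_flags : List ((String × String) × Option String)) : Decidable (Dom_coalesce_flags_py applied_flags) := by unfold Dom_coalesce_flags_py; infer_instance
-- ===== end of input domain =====

-- B replaces A's sequential last_state state machine by a divide-and-conquer that
-- merges (body, args, first_state, last_state) summaries of the two halves (alternative).


-- ===== PORT A =====
-- literal transliteration of A's single loop with the last_state state machine
def coalesce_flags_py (applied_flags : List ((String × String) × Option String)) : String × List String :=
  let r := applied_flags.foldl
    (fun (acc : String × List String × Option String) fa =>
      let (flags, args, last_state) := acc
      let ((state, c), arg) := fa
      let (flags, last_state) :=
        if some state ≠ last_state then (flags ++ state, some state) else (flags, last_state)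
      let flags := flags ++ c
      let args := match arg with
        | some a => args ++ [a]
        | none => args
      (flags, args, last_state))
    ("", ([], none))
  (r.1, r.2.1)

-- ===== PORT B =====
-- Source B's recursive solve: on a nonempty slice returns (body, args, first_state,
-- last_state), where the flag string of the slice is first_state ++ body; the two
-- halves' results are merged, re-emitting the right half's first state only when it
-- differs from the left half's last state.  (The [] case is unreachable from
-- coalesce_flags_py_alt, which matches Source B calling solve only on nonempty lists.)
def pvSolve : List ((String × String) × Option String) → String × List String × String × String
  | [] => ("", ([], "", ""))
  | [x] => (x.1.2, ((match x.2 with | none => ([] : List String) | some a => [a]), x.1.1, x.1.1))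
  | x :: y :: rest =>
      let mid := (x :: y :: rest).length / 2
      let lres := pvSolve ((x :: y :: rest).take mid)
      let rres := pvSolve ((x :: y :: rest).drop mid)
      (lres.1 ++ (if lres.2.2.2 = rres.2.2.1 then rres.1 else rres.2.2.1 ++ rres.1),
       (lres.2.1 ++ rres.2.1, lres.2.2.1, rres.2.2.2))
termination_by l => l.length
decreasing_by
  · simp; omega
  · simp; omega

def coalesce_flags_py_alt (applied_flags : List ((String × String) × Option String)) : String × List String :=
  match applied_flags with
  | [] => ("", [])
  | _ :: _ =>
      let r := pvSolve applied_flags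
      (r.2.2.1 ++ r.1, r.2.1)

-- ===== PRECONDITION & SPEC =====
def Spec_coalesce_flags_py (applied_flags : List ((String × String) × Option String)) (out : String × List String) : Prop := out = coalesce_flags_py_alt applied_flags
instance (applied_flags : List ((String × String) × Option String)) (out : String × List String) : Decidable (Spec_coalesce_flags_py applied_flags out) := by unfold Spec_coalesce_flags_py; infer_instance

-- ===== CLAIM (what is proved, stated in full; the proofs are below) =====
def Claim_equal_coalesce_flags_py : Prop := ∀ (applied_flags : List ((String × String) × Option String)), Dom_coalesce_flags_py applied_flags → Spec_coalesce_flags_py applied_flags (coalesce_flags_py applied_flags)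

-- ===== LEMMAS AND PROOFS =====

-- proof-local name for A's loop body (definitionally the lambda in the port)
def pvStep (acc : String × List String × Option String)
    (fa : (String × String) × Option String) : String × List String × Option String :=
  let (flags, args, last_state) := acc
  let ((state, c), arg) := fa
  let (flags, last_state) :=
    if some state ≠ last_state then (flags ++ state, some state) else (flags, last_state)
  let flags := flags ++ c
  let args := match arg with
    | some a => args ++ [a]
    | none => args
  (flags, args, last_state)

-- flags appended by A's loop over l when last_state starts as t
def pvPhi : Option String → List ((String × String) × Option String) → String
  | _, [] => ""
  | t, x :: r =>
      (if some x.1.1 ≠ t then x.1.1 else "") ++ x.1.2 ++ pvPhi (some x.1.1) r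

-- last_state after A's loop over l starting from t
def pvLast (t : Option String) (l : List ((String × String) × Option String)) : Option String :=
  l.foldl (fun _ fa => some fa.1.1) t

theorem pvFold_inv (l : List ((String × String) × Option String)) :
    ∀ (fl : String) (ar : List String) (t : Option String),
    l.foldl pvStep (fl, (ar, t)) =
      (fl ++ pvPhi t l, (ar ++ l.filterMap (fun fa => fa.2), pvLast t l)) := by
  induction l with
  | nil => intro fl ar t; simp [pvPhi, pvLast]
  | cons x rest ih =>
    intro fl ar t
    obtain ⟨⟨st, c⟩, arg⟩ := x
    rw [List.foldl_cons]
    by_cases h : some st = t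
    · have hstep : pvStep (fl, (ar, t)) ((st, c), arg) =
          (fl ++ c, ((match arg with | some a => ar ++ [a] | none => ar), some st)) := by
        simp [pvStep, h]
      rw [hstep, ih]
      cases arg <;> simp [pvPhi, pvLast, h, String.append_assoc]
    · have hstep : pvStep (fl, (ar, t)) ((st, c), arg) =
          (fl ++ st ++ c, ((match arg with | some a => ar ++ [a] | none => ar), some st)) := by
        simp [pvStep, h]
      rw [hstep, ih]
      cases arg <;> simp [pvPhi, pvLast, h, String.append_assoc]

theorem pvPhi_append (l₁ l₂ : List ((String × String) × Option String)) :
    ∀ t, pvPhi t (l₁ ++ l₂) = pvPhi t l₁ ++ pvPhi (pvLast t l₁) l₂ := by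
  induction l₁ with
  | nil => intro t; simp [pvPhi, pvLast]
  | cons x rest ih => intro t; simp [pvPhi, pvLast, ih, String.append_assoc]

-- the last state over a nonempty list is some value (independent of the start)
theorem pvLast_cons (t : Option String) (a : (String × String) × Option String)
    (r : List ((String × String) × Option String)) :
    ∃ s, pvLast t (a :: r) = some s := by
  induction r generalizing a t with
  | nil => exact ⟨a.1.1, rfl⟩
  | cons b r ih => exact ih (some a.1.1) b

-- pvSolve computes (body, args, first, last) with body = pvPhi (some first) l
theorem pvSolve_correct :
    ∀ (n : ℕ) (l : List ((String × String) × Option String)) (x₀ : (String × String) × Option String),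
    l.length ≤ n → l ≠ [] →
    pvSolve l = (pvPhi (some (l.headD x₀).1.1) l,
      (l.filterMap (fun fa => fa.2), (l.headD x₀).1.1,
       (pvLast none l).getD "")) := by
  intro n
  induction n with
  | zero => intro l x₀ hn hne; cases l with | nil => exact absurd rfl hne | cons a r => simp at hn
  | succ n ih =>
    intro l x₀ hn hne
    match l with
    | [x] =>
      obtain ⟨⟨st, c⟩, arg⟩ := x
      cases arg <;> simp [pvSolve, pvPhi, pvLast]
    | x :: y :: rest =>
      simp only [pvSolve]
      have hlen : (x :: y :: rest).length = rest.length + 2 := by simp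
      have hmid1 : 1 ≤ (x :: y :: rest).length / 2 := by omega
      have hmidlt : (x :: y :: rest).length / 2 < (x :: y :: rest).length := by omega
      obtain ⟨m, hm⟩ : ∃ m, (x :: y :: rest).length / 2 = m + 1 :=
        ⟨(x :: y :: rest).length / 2 - 1, by omega⟩
      have hLcons : (x :: y :: rest).take ((x :: y :: rest).length / 2) =
          x :: ((y :: rest).take m) := by rw [hm]; rfl
      obtain ⟨a, r, hRcons⟩ : ∃ a r,
          (x :: y :: rest).drop ((x :: y :: rest).length / 2) = a :: r := by
        cases h : (x :: y :: rest).drop ((x :: y :: rest).length / 2) with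
        | nil => exfalso; have := congrArg List.length h; simp at this; omega
        | cons a r => exact ⟨a, r, rfl⟩
      have hLlen : ((x :: y :: rest).take ((x :: y :: rest).length / 2)).length ≤ n := by
        rw [List.length_take]; omega
      have hRlen : ((x :: y :: rest).drop ((x :: y :: rest).length / 2)).length ≤ n := by
        rw [List.length_drop]; omega
      rw [ih ((x :: y :: rest).take ((x :: y :: rest).length / 2)) x₀
            hLlen (by rw [hLcons]; simp),
          ih ((x :: y :: rest).drop ((x :: y :: rest).length / 2)) x₀
            hRlen (by rw [hRcons]; simp)]
      have hsplit : (x :: ((y :: rest).take m)) ++ (a :: r) = x :: y :: rest := by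
        rw [← hLcons, ← hRcons]; exact List.take_append_drop _ _
      rw [hLcons, hRcons]
      simp only [List.headD_cons]
      obtain ⟨sL, hsLv⟩ := pvLast_cons none x ((y :: rest).take m)
      obtain ⟨sR, hsRv⟩ := pvLast_cons none a r
      have hlastR : pvLast none (x :: y :: rest) = some sR := by
        rw [← hsplit, pvLast, List.foldl_append]
        exact hsRv
      have hphi : pvPhi (some x.1.1) (x :: y :: rest) =
          pvPhi (some x.1.1) (x :: ((y :: rest).take m)) ++
            (if sL = a.1.1 then pvPhi (some a.1.1) (a :: r)
             else a.1.1 ++ pvPhi (some a.1.1) (a :: r)) := by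
        conv_lhs => rw [← hsplit]
        rw [pvPhi_append]
        congr 1
        have hlastL : pvLast (some x.1.1) (x :: ((y :: rest).take m)) = some sL := hsLv
        rw [hlastL]
        by_cases h : sL = a.1.1
        · simp [pvPhi, h]
        · have h' : ¬ a.1.1 = sL := fun hh => h hh.symm
          simp [pvPhi, h, h', String.append_assoc]
      have hargs : (x :: y :: rest).filterMap (fun fa => fa.2) =
          (x :: ((y :: rest).take m)).filterMap (fun fa => fa.2) ++
            (a :: r).filterMap (fun fa => fa.2) := by
        rw [← hsplit, List.filterMap_append]
      simp only [hsLv, hsRv, hlastR, Option.getD_some]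
      rw [hphi, hargs]

-- ===== VERDICT (by name: the statement is the Claim_ definition above) =====
theorem coalesce_flags_py_spec : Claim_equal_coalesce_flags_py := by
  intro l _
  unfold Spec_coalesce_flags_py
  have hA : coalesce_flags_py l =
      ((l.foldl pvStep ("", ([], none))).1, (l.foldl pvStep ("", ([], none))).2.1) := rfl
  rw [hA, pvFold_inv]
  cases l with
  | nil => simp [coalesce_flags_py_alt, pvPhi]
  | cons x rest =>
    rw [coalesce_flags_py_alt]
    rw [pvSolve_correct (x :: rest).length (x :: rest) x (le_refl _) (by simp)]
    obtain ⟨⟨st, c⟩, arg⟩ := x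
    simp [pvPhi, String.append_assoc]
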